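-- pv_equiv track=rewrite | github.com/andre-juan/good_quantum_kernels | code/qsvm_utils.py | cart_product_string
-- ===== SOURCE A (Python) =====
-- from itertools import combinations, permutations, product
--
-- def cart_product_string(my_string, feature_dim):
--     '''
--     this function returns a list of all cartesian products of characters of "my_string",
--     of maximum length equal to "feature_dim", and each one joined in a string.
--     for instance, if my_string = "XYZ", and feature_dim = 2, the function returns the following list:
--     ['X', 'Y', 'Z', 'XX', 'XY', 'XZ', 'YX', 'YY', 'YZ', 'ZX', 'ZY', 'ZZ']
--     obs.: here, the order matters. So, "YX" is NOT equivalent to "XY", so we must consider both cases.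
--     this is why we use the cartesian product.
--     '''
--
--     perms = []
--
--     for i in range(1, feature_dim+1):
--
--         for p in product(my_string, repeat=i):
--
--             temp = "".join(p)
--
--             if len(temp) > 0:
--
--                 perms.append(temp)
--
--     return perms
-- ===== SOURCE B (Python) =====
-- def cart_product_string(my_string, feature_dim):
--     # Grow a frontier level by level: prev holds all strings of the current
--     # length; prepending each character produces the next level in the same
--     # order itertools.product emits (leftmost character varies slowest).
--     out = []
--     prev = [""]
--     for _ in range(1, feature_dim + 1):
--         prev = [c + s for c in my_string for s in prev]
--         out.extend(prev)
--     return out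
-- ===== Notes on version B (the rewrite author's own statement) =====
-- stated objective: alternative
-- what changed: Replaces the per-length calls to itertools.product (which rebuilds every tuple from scratch and joins it) with a single growing frontier: each level's strings are built by prepending one character to the previous level's strings.
import Mathlib
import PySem

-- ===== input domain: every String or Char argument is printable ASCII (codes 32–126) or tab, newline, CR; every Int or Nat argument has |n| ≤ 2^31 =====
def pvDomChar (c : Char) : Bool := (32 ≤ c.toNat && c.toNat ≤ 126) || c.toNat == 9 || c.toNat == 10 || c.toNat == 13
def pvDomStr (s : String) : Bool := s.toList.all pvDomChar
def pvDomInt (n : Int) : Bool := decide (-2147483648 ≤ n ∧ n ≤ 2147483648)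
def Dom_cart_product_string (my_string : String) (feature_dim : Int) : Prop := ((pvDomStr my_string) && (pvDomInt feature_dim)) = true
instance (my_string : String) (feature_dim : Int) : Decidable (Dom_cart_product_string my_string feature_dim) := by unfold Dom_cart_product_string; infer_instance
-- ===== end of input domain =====

-- B replaces the per-length itertools.product passes by one growing frontier of
-- previous-level strings (each new string is a single character prepend); same
-- output, same order.

-- ===== PORT A =====
-- itertools.product(my_string, repeat=n), as the list of character tuples in
-- product order (leftmost position varies slowest), tuples as List Char.
def pvProductRepeat (chars : List Char) : Nat → List (List Char)
  | 0 => [[]]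
  | n + 1 => chars.flatMap (fun c => (pvProductRepeat chars n).map (fun p => c :: p))

def cart_product_string (my_string : String) (feature_dim : Int) : List String :=
  (PySem.List.pyRange 1 (feature_dim + 1) 1).foldl
    (fun perms i =>
      (pvProductRepeat my_string.toList i.toNat).foldl
        (fun perms p =>
          let temp := String.ofList p          -- "".join(p)
          if PySem.Str.len temp > 0 then perms ++ [temp] else perms)
        perms)
    []

-- ===== PORT B =====
-- strings are carried as List Char (c + s = c :: s) and materialized with
-- String.ofList at the end; exact on all inputs.
def cart_product_string_alt (my_string : String) (feature_dim : Int) : List String :=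
  ((PySem.List.pyRange 1 (feature_dim + 1) 1).foldl
    (fun (st : List (List Char) × List (List Char)) _ =>
      let prev := my_string.toList.flatMap (fun c => st.1.map (fun s => c :: s))
      (prev, st.2 ++ prev))
    ([[]], [])).2.map String.ofList

-- ===== PRECONDITION & SPEC =====
def Spec_cart_product_string (my_string : String) (feature_dim : Int) (out : List String) : Prop := out = cart_product_string_alt my_string feature_dim
instance (my_string : String) (feature_dim : Int) (out : List String) : Decidable (Spec_cart_product_string my_string feature_dim out) := by unfold Spec_cart_product_string; infer_instance

-- ===== CLAIM (what is proved, stated in full; the proofs are below) =====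
def Claim_equal_cart_product_string : Prop := ∀ (my_string : String) (feature_dim : Int), Dom_cart_product_string my_string feature_dim → Spec_cart_product_string my_string feature_dim (cart_product_string my_string feature_dim)

-- ===== LEMMAS AND PROOFS =====

-- every tuple of positive length is nonempty
theorem pvProductRepeat_ne_nil (chars : List Char) (n : Nat) :
    ∀ p ∈ pvProductRepeat chars (n + 1), p ≠ [] := by
  intro p hp
  simp [pvProductRepeat] at hp
  obtain ⟨c, _, q, _, rfl⟩ := hp
  simp

-- A's inner loop with its (always-true) nonemptiness filter is append-of-map
theorem pvInnerA (ps : List (List Char)) :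
    ∀ acc : List String, (∀ p ∈ ps, p ≠ []) →
      ps.foldl
        (fun perms p =>
          let temp := String.ofList p
          if PySem.Str.len temp > 0 then perms ++ [temp] else perms)
        acc = acc ++ ps.map String.ofList := by
  induction ps with
  | nil => simp
  | cons p ps ih =>
    intro acc h
    have hp : p ≠ [] := h p (by simp)
    have hlen : PySem.Str.len (String.ofList p) > 0 := by
      have hl : 0 < p.length := List.length_pos_iff.mpr hp
      simp [PySem.Str.len_eq]
      omega
    simp only [List.foldl_cons, if_pos hlen]
    rw [ih _ (fun q hq => h q (by simp [hq]))]
    simp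

-- the two loops agree, tracked over the shared range list
theorem pvLoop (chars : List Char) :
    ∀ (n : Nat) (a : Int), 1 ≤ a →
      ∀ (accB : List (List Char)),
        (PySem.List.pyRange a (a + n) 1).foldl
          (fun perms i =>
            (pvProductRepeat chars i.toNat).foldl
              (fun perms p =>
                let temp := String.ofList p
                if PySem.Str.len temp > 0 then perms ++ [temp] else perms)
              perms)
          (accB.map String.ofList)
        = (((PySem.List.pyRange a (a + n) 1).foldl
            (fun (st : List (List Char) × List (List Char)) _ =>
              let prev := chars.flatMap (fun c => st.1.map (fun s => c :: s))
              (prev, st.2 ++ prev))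
            (pvProductRepeat chars (a - 1).toNat, accB)).2).map String.ofList := by
  intro n
  induction n with
  | zero =>
    intro a _ accB
    rw [PySem.List.pyRange_one_eq_nil (by omega)]
    rfl
  | succ n ih =>
    intro a ha accB
    rw [PySem.List.pyRange_one_cons (by omega)]
    simp only [List.foldl_cons]
    have hstep : chars.flatMap (fun c => (pvProductRepeat chars (a - 1).toNat).map (fun s => c :: s))
        = pvProductRepeat chars a.toNat := by
      have : a.toNat = (a - 1).toNat + 1 := by omega
      rw [this]
      rfl
    have hne : ∀ p ∈ pvProductRepeat chars a.toNat, p ≠ [] := by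
      have : a.toNat = (a - 1).toNat + 1 := by omega
      rw [this]
      exact pvProductRepeat_ne_nil chars _
    rw [pvInnerA _ _ hne]
    have haccs : accB.map String.ofList ++ (pvProductRepeat chars a.toNat).map String.ofList
        = (accB ++ pvProductRepeat chars a.toNat).map String.ofList := by simp
    rw [haccs]
    have hrange : a + ((n + 1 : Nat) : Int) = (a + 1) + (n : Int) := by push_cast; ring
    rw [hrange]
    have := ih (a + 1) (by omega) (accB ++ pvProductRepeat chars a.toNat)
    have hprev : (a + 1 - 1).toNat = a.toNat := by omega
    rw [hprev] at this
    rw [this, hstep]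

-- ===== VERDICT (by name: the statement is the Claim_ definition above) =====
theorem cart_product_string_spec : Claim_equal_cart_product_string := by
  intro my_string feature_dim _
  unfold Spec_cart_product_string cart_product_string cart_product_string_alt
  by_cases hfd : 1 ≤ feature_dim
  · have h : feature_dim + 1 = 1 + (feature_dim.toNat : Int) := by omega
    rw [h]
    have := pvLoop my_string.toList feature_dim.toNat 1 (by omega) []
    simpa [pvProductRepeat] using this
  · rw [PySem.List.pyRange_one_eq_nil (by omega)]
    simp
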